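-- pv_equiv track=rewrite | github.com/chulhyunjo/TIL | 03_algorithm/2308/0820/운영체제 pccp.py | solution
-- ===== SOURCE A (Python) =====
-- import heapq
--
-- def solution(program):
--     N = len(program)
--     program.sort(key=lambda x: x[1])
--
--     pq = []
--
--     cnt = 0
--     time = 0
--     answer = [0] * 11
--     while True:
--         while cnt < N and program[cnt][1] <= time:
--             heapq.heappush(pq, (program[cnt][0], program[cnt][1], program[cnt][2]))
--             cnt += 1
--         if pq:
--             a, b, c = heapq.heappop(pq)
--             answer[a] += time - b
--             time += c
--             answer[0] = time
--         else:
--             time = program[cnt][1]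
--
--         if not pq and cnt == N:
--             break
--
--     return answer
-- ===== SOURCE B (Python) =====
-- def solution(program):
--     # Simpler: explicit pending list with a min-scan instead of a heap,
--     # and list slicing instead of an index pointer. Sorts program in place like A.
--     program.sort(key=lambda x: x[1])
--     answer = [0] * 11
--     time = 0
--     pending = []
--     rest = [(r[0], r[1], r[2]) for r in program]
--     while rest or pending:
--         k = 0
--         while k < len(rest) and rest[k][1] <= time:
--             k += 1
--         pending += rest[:k]
--         rest = rest[k:]
--         if pending:
--             best = min(pending)
--             pending.remove(best)
--             a, b, c = best
--             answer[a] += time - b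
--             time += c
--             answer[0] = time
--         else:
--             time = rest[0][1]
--     return answer
-- ===== Notes on version B (the rewrite author's own statement) =====
-- stated objective: simpler
-- what changed: Replaces the heapq priority queue and the cnt index pointer with a plain pending list scanned for its minimum triple each step and a shrinking slice of the sorted task list; the loop tests its exit condition up front instead of a bottom break.
-- outside the precondition, e.g. on solution([]): A raises IndexError, B returns [0, 0, 0, 0, 0, 0, 0, 0, 0, 0, 0]
import Mathlib
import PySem

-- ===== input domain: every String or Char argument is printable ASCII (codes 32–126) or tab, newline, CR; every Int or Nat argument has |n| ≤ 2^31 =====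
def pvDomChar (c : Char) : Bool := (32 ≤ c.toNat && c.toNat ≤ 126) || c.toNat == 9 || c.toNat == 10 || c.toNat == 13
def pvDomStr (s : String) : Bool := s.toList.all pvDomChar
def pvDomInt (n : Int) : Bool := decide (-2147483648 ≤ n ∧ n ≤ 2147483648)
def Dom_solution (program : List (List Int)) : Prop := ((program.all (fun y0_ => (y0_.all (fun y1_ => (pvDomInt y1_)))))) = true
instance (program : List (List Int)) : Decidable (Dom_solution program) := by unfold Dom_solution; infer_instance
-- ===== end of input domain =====

-- B replaces A's heapq priority queue and cnt index pointer by a pending list with an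
-- explicit min-scan and a shrinking slice of the sorted task list (objective: simpler).
-- Both Pythons sort `program` in place; the equivalence proved here is about the return value.

-- Python tuple comparison '<' on the (priority, arrival, duration) triples (shared helper).
def tupLt (a b : Int × Int × Int) : Bool :=
  decide (a.1 < b.1) ||
    (a.1 == b.1 && (decide (a.2.1 < b.2.1) || (a.2.1 == b.2.1 && decide (a.2.2 < b.2.2))))

-- (r[0], r[1], r[2]) of a row (shared helper).
def tripleOf (r : List Int) : Int × Int × Int :=
  (PySem.List.pyGetD r 0 0, PySem.List.pyGetD r 1 0, PySem.List.pyGetD r 2 0)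

-- ===== PORT A =====
-- heapq is modeled by a list kept sorted: heappush inserts in order, heappop takes the head.
-- Observationally exact: heappop returns the minimum tuple, and equal tuples are identical values.
def heapPush (h : List (Int × Int × Int)) (x : Int × Int × Int) : List (Int × Int × Int) :=
  match h with
  | [] => [x]
  | y :: t => if tupLt x y then x :: y :: t else y :: heapPush t x

-- the inner 'while cnt < N and program[cnt][1] <= time' push loop
def pushPhase (S : List (List Int)) (N cnt : Nat) (pq : List (Int × Int × Int)) (time : Int) :
    Nat × List (Int × Int × Int) :=
  if h : cnt < N ∧ PySem.List.pyGetD (PySem.List.pyGetD S (cnt : Int) []) 1 0 ≤ time then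
    pushPhase S N (cnt + 1) (heapPush pq (tripleOf (PySem.List.pyGetD S (cnt : Int) []))) time
  else (cnt, pq)
termination_by N - cnt
decreasing_by omega

-- the 'while True' loop (fuel only makes it total; 2*N+1 iterations always suffice)
def loopA (S : List (List Int)) (N : Nat) :
    Nat → Nat → List (Int × Int × Int) → Int → List Int → List Int
  | 0, _, _, _, answer => answer
  | fuel + 1, cnt, pq, time, answer =>
    match pushPhase S N cnt pq time with
    | (cnt', (a, b, c) :: t) =>
      let ans1 := PySem.List.pySetD answer a (PySem.List.pyGetD answer a 0 + (time - b))
      let time' := time + c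
      let ans2 := PySem.List.pySetD ans1 0 time'
      if t = [] ∧ cnt' = N then ans2 else loopA S N fuel cnt' t time' ans2
    | (cnt', []) =>
      let time' := PySem.List.pyGetD (PySem.List.pyGetD S (cnt' : Int) []) 1 0
      if cnt' = N then answer else loopA S N fuel cnt' [] time' answer

def solution (program : List (List Int)) : List Int :=
  let N := program.length
  let S := PySem.List.sorted program (fun x => PySem.List.pyGetD x 1 0) false
  loopA S N (2 * N + 1) 0 [] 0 (List.replicate 11 0)

-- ===== PORT B =====
-- the inner counting loop 'while k < len(rest) and rest[k][1] <= time: k += 1'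
def countK (rest : List (Int × Int × Int)) (time : Int) : Nat :=
  match rest with
  | [] => 0
  | r :: t => if r.2.1 ≤ time then countK t time + 1 else 0

-- min(pending): first element, improved by strict '<' (Python's min keeps the first tie)
def minScan (x : Int × Int × Int) (xs : List (Int × Int × Int)) : Int × Int × Int :=
  xs.foldl (fun m y => if tupLt y m then y else m) x

-- the 'while rest or pending' loop (fuel only makes it total)
def loopB : Nat → List (Int × Int × Int) → List (Int × Int × Int) → Int → List Int → List Int
  | 0, _, _, _, answer => answer
  | fuel + 1, rest, pending, time, answer =>
    if rest = [] ∧ pending = [] then answer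
    else
      let k := countK rest time
      let pending1 := pending ++ rest.take k
      let rest1 := rest.drop k
      match pending1 with
      | best0 :: ps =>
        let best := minScan best0 ps
        let pending2 := pending1.erase best   -- pending.remove(best); best ∈ pending1, so no ValueError
        let ans1 := PySem.List.pySetD answer best.1
          (PySem.List.pyGetD answer best.1 0 + (time - best.2.1))
        let time' := time + best.2.2
        loopB fuel rest1 pending2 time' (PySem.List.pySetD ans1 0 time')
      | [] =>
        loopB fuel rest1 [] ((PySem.List.pyGetD rest1 0 (0, 0, 0)).2.1) answer

def solution_alt (program : List (List Int)) : List Int :=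
  let S := PySem.List.sorted program (fun x => PySem.List.pyGetD x 1 0) false
  loopB (2 * program.length + 2) (S.map tripleOf) [] 0 (List.replicate 11 0)

-- ===== PRECONDITION & SPEC =====
-- Pre_ is exactly where the Python A returns: a nonempty program (on [] the next-arrival jump
-- raises IndexError), rows of length ≥ 3 (row indexing), and priorities that are valid Python
-- indices into the 11-slot answer list, i.e. -11 ≤ r[0] ≤ 10 (negative ones wrap; both programs wrap alike).
def Pre_solution (program : List (List Int)) : Prop :=
  program ≠ [] ∧ ∀ r ∈ program, 3 ≤ r.length ∧ -11 ≤ r.getD 0 0 ∧ r.getD 0 0 ≤ 10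
instance (program : List (List Int)) : Decidable (Pre_solution program) := by
  unfold Pre_solution; infer_instance

def pvWitness_solution : List (List Int) := [[1, 0, 2], [2, 1, 1]]

def Spec_solution (program : List (List Int)) (out : List Int) : Prop := out = solution_alt program
instance (program : List (List Int)) (out : List Int) : Decidable (Spec_solution program out) := by
  unfold Spec_solution; infer_instance

-- ===== CLAIM (what is proved, stated in full; the proofs are below) =====
def Claim_equal_solution : Prop := ∀ (program : List (List Int)), Dom_solution program → Pre_solution program → Spec_solution program (solution program)

-- ===== LEMMAS AND PROOFS =====

-- order facts about tupLt
lemma tupLt_antisymm {a b : Int × Int × Int}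
    (h1 : tupLt a b = false) (h2 : tupLt b a = false) : a = b := by
  obtain ⟨a1, a2, a3⟩ := a; obtain ⟨b1, b2, b3⟩ := b
  simp [tupLt] at h1 h2
  have : a1 = b1 ∧ a2 = b2 ∧ a3 = b3 := by omega
  simp [this.1, this.2.1, this.2.2]

lemma tupLt_le_trans {a b c : Int × Int × Int}
    (h1 : tupLt b a = false) (h2 : tupLt c b = false) : tupLt c a = false := by
  obtain ⟨a1, a2, a3⟩ := a; obtain ⟨b1, b2, b3⟩ := b; obtain ⟨c1, c2, c3⟩ := c
  simp [tupLt] at h1 h2 ⊢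
  omega

lemma tupLt_false_total {a b : Int × Int × Int} (h : tupLt a b = true) : tupLt b a = false := by
  obtain ⟨a1, a2, a3⟩ := a; obtain ⟨b1, b2, b3⟩ := b
  simp [tupLt] at h ⊢
  omega

-- heapPush facts
lemma heapPush_perm (h : List (Int × Int × Int)) (x : Int × Int × Int) :
    (heapPush h x).Perm (x :: h) := by
  induction h with
  | nil => simp [heapPush]
  | cons y t ih =>
    simp only [heapPush]
    split
    · exact List.Perm.refl _
    · exact (ih.cons y).trans (List.Perm.swap x y t)

lemma heapPush_sorted {h : List (Int × Int × Int)} (x : Int × Int × Int)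
    (hs : h.Pairwise (fun a b => tupLt b a = false)) :
    (heapPush h x).Pairwise (fun a b => tupLt b a = false) := by
  induction h with
  | nil => simp [heapPush]
  | cons y t ih =>
    rw [List.pairwise_cons] at hs
    simp only [heapPush]
    split
    · rename_i hlt
      refine List.pairwise_cons.2 ⟨?_, List.pairwise_cons.2 ⟨hs.1, hs.2⟩⟩
      intro z hz
      rcases List.mem_cons.1 hz with rfl | hz'
      · exact tupLt_false_total hlt
      · exact tupLt_le_trans (tupLt_false_total hlt) (hs.1 z hz')
    · rename_i hnlt
      refine List.pairwise_cons.2 ⟨?_, ih hs.2⟩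
      intro z hz
      rcases List.mem_cons.1 ((heapPush_perm t x).mem_iff.1 hz) with rfl | hz'
      · exact Bool.eq_false_iff.2 hnlt
      · exact hs.1 z hz'

lemma foldl_heapPush_perm (ys : List (Int × Int × Int)) :
    ∀ pq, (ys.foldl heapPush pq).Perm (pq ++ ys) := by
  induction ys with
  | nil => simp
  | cons y t ih =>
    intro pq
    have h1 := ih (heapPush pq y)
    have h2 : (heapPush pq y ++ t).Perm (pq ++ y :: t) :=
      ((heapPush_perm pq y).append_right t).trans List.perm_middle.symm
    exact h1.trans h2

lemma foldl_heapPush_sorted (ys : List (Int × Int × Int)) :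
    ∀ pq, pq.Pairwise (fun a b => tupLt b a = false) →
      (ys.foldl heapPush pq).Pairwise (fun a b => tupLt b a = false) := by
  induction ys with
  | nil => intro pq h; simpa using h
  | cons y t ih => intro pq h; exact ih _ (heapPush_sorted y h)

lemma foldl_heapPush_length (ys : List (Int × Int × Int)) (pq : List (Int × Int × Int)) :
    (ys.foldl heapPush pq).length = pq.length + ys.length := by
  have := (foldl_heapPush_perm ys pq).length_eq
  simpa using this

lemma foldl_heapPush_eq_nil {ys pq : List (Int × Int × Int)}
    (h : ys.foldl heapPush pq = []) : pq = [] ∧ ys = [] := by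
  have := foldl_heapPush_length ys pq
  rw [h] at this
  simp at this
  constructor
  · exact List.length_eq_zero_iff.1 (by omega)
  · exact List.length_eq_zero_iff.1 (by omega)

lemma tupLt_irrefl (a : Int × Int × Int) : tupLt a a = false := by
  obtain ⟨a1, a2, a3⟩ := a; simp [tupLt]

-- minScan facts
lemma minScan_spec (x : Int × Int × Int) (xs : List (Int × Int × Int)) :
    minScan x xs ∈ x :: xs ∧ ∀ y ∈ x :: xs, tupLt y (minScan x xs) = false := by
  induction xs generalizing x with
  | nil =>
    refine ⟨by simp [minScan], ?_⟩
    intro y hy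
    rw [List.mem_singleton] at hy
    subst hy
    simpa [minScan] using tupLt_irrefl y
  | cons z t ih =>
    have hstep : minScan x (z :: t) = minScan (if tupLt z x then z else x) t := by
      simp [minScan, List.foldl]
    constructor
    · rw [hstep]
      have h1 := (ih (if tupLt z x then z else x)).1
      rw [List.mem_cons] at h1
      rcases h1 with h1 | h1
      · rw [h1]; by_cases hzx : tupLt z x = true <;> simp [hzx]
      · simp [h1]
    · intro y hy
      rw [hstep]
      have hc := (ih (if tupLt z x then z else x)).2
      rw [List.mem_cons, List.mem_cons] at hy
      rcases hy with h1 | h1 | h1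
      · subst h1
        by_cases hzx : tupLt z y = true
        · exact tupLt_le_trans (hc z (by simp [hzx])) (tupLt_false_total hzx)
        · exact hc y (by simp [hzx])
      · subst h1
        by_cases hzx : tupLt y x = true
        · exact hc y (by simp [hzx])
        · exact tupLt_le_trans (hc x (by simp [hzx])) (Bool.eq_false_iff.2 hzx)
      · exact hc y (by simp [h1])

-- countK is at most the length
lemma countK_le_length (rest : List (Int × Int × Int)) (time : Int) :
    countK rest time ≤ rest.length := by
  induction rest with
  | nil => simp [countK]
  | cons r t ih =>
    simp only [countK]
    split
    · simp; omega
    · simp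

-- pushPhase computes countK/take/foldl over the drop-suffix
lemma pushPhase_spec (S : List (List Int)) (N : Nat) (hN : N = S.length) :
    ∀ d cnt pq time, N - cnt = d → cnt ≤ N →
      pushPhase S N cnt pq time =
        (cnt + countK ((S.map tripleOf).drop cnt) time,
         (((S.map tripleOf).drop cnt).take (countK ((S.map tripleOf).drop cnt) time)).foldl heapPush pq) := by
  intro d
  induction d with
  | zero =>
    intro cnt pq time hd hle
    have hcnt : cnt = N := by omega
    have hrest : (S.map tripleOf).drop cnt = [] := by
      apply List.drop_eq_nil_of_le; simp [← hN]; omega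
    rw [pushPhase]
    rw [dif_neg (by rintro ⟨h, _⟩; omega)]
    simp [hrest, countK]
  | succ d ih =>
    intro cnt pq time hd hle
    have hcnt : cnt < N := by omega
    have hlt : cnt < (S.map tripleOf).length := by simp [← hN]; omega
    have hcS : cnt < S.length := by omega
    have hget : PySem.List.pyGetD S (cnt : Int) [] = S[cnt] := by
      rw [PySem.List.pyGetD_natCast]; exact List.getD_eq_getElem _ _ hcS
    have hrest : (S.map tripleOf).drop cnt = tripleOf S[cnt] :: (S.map tripleOf).drop (cnt + 1) := by
      rw [List.drop_eq_getElem_cons hlt]; simp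
    rw [pushPhase]
    by_cases harr : PySem.List.pyGetD (PySem.List.pyGetD S (cnt : Int) []) 1 0 ≤ time
    · rw [dif_pos ⟨hcnt, harr⟩]
      rw [ih (cnt + 1) (heapPush pq (tripleOf (PySem.List.pyGetD S (cnt : Int) []))) time
            (by omega) (by omega)]
      rw [hrest, hget]
      have harr' : (tripleOf S[cnt]).2.1 ≤ time := by
        rw [hget] at harr; exact harr
      simp only [countK, if_pos harr', List.take_succ_cons, List.foldl_cons]
      refine Prod.ext ?_ rfl
      simp; omega
    · rw [dif_neg (by rintro ⟨_, h⟩; exact harr h)]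
      rw [hrest]
      have harr' : ¬ (tripleOf S[cnt]).2.1 ≤ time := by
        rw [hget] at harr; exact harr
      simp [countK, if_neg harr']

-- the fuel measure: remaining iterations of either loop
def muA (S : List (List Int)) (N cnt : Nat) (pq : List (Int × Int × Int)) (time : Int) : Nat :=
  2 * ((N - cnt) + pq.length) +
    (if pq = [] ∧ cnt < N ∧ time < PySem.List.pyGetD (PySem.List.pyGetD S (cnt : Int) []) 1 0
     then 1 else 0)

lemma loopB_done (f2 : Nat) (time : Int) (ans : List Int) :
    loopB f2 [] [] time ans = ans := by
  cases f2 <;> simp [loopB]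

-- main lockstep lemma
lemma loop_eq (S : List (List Int)) (N : Nat) (hN : N = S.length) :
    ∀ f1 f2 cnt pq pending time ans,
      cnt ≤ N →
      pq.Pairwise (fun a b => tupLt b a = false) →
      pq.Perm pending →
      muA S N cnt pq time ≤ f1 → muA S N cnt pq time ≤ f2 →
      loopA S N f1 cnt pq time ans = loopB f2 ((S.map tripleOf).drop cnt) pending time ans := by
  intro f1
  induction f1 with
  | zero =>
    intro f2 cnt pq pending time ans hcnt hsort hperm h1 h2
    have hz : N - cnt = 0 ∧ pq.length = 0 := by
      unfold muA at h1; split at h1 <;> omega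
    have hpq : pq = [] := List.length_eq_zero_iff.1 hz.2
    have hpend : pending = [] := by
      have := hperm.length_eq; rw [hpq] at this
      exact List.length_eq_zero_iff.1 this.symm
    have hrest : (S.map tripleOf).drop cnt = [] := by
      apply List.drop_eq_nil_of_le; simp [← hN]; omega
    rw [hrest, hpend, loopB_done]
    simp [loopA]
  | succ f1 ih =>
    intro f2 cnt pq pending time ans hcnt hsort hperm h1 h2
    by_cases hdone : pq = [] ∧ cnt = N
    · obtain ⟨hpq, hcN⟩ := hdone
      subst hpq
      have hrest : (S.map tripleOf).drop cnt = [] := by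
        apply List.drop_eq_nil_of_le; simp [← hN]; omega
      have hpend : pending = [] := by
        have := hperm.length_eq
        exact List.length_eq_zero_iff.1 (by simpa using this.symm)
      rw [hrest, hpend, loopB_done]
      simp only [loopA]
      rw [pushPhase_spec S N hN (N - cnt) cnt [] time rfl (by omega)]
      have hrestN : (S.map tripleOf).drop N = [] := by
        apply List.drop_eq_nil_of_le; simp [← hN]
      simp [countK, hcN, hrestN]
    · -- not done: both loops take one step
      have hsum : 1 ≤ (N - cnt) + pq.length := by
        rcases not_and_or.1 hdone with h | h
        · have := List.length_pos_of_ne_nil h; omega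
        · omega
      have hmu2 : 2 ≤ muA S N cnt pq time := by unfold muA; split <;> omega
      cases f2 with
      | zero => omega
      | succ f2 =>
      have hpush := pushPhase_spec S N hN (N - cnt) cnt pq time rfl hcnt
      have hrlen : ((S.map tripleOf).drop cnt).length = N - cnt := by simp [← hN]
      have hBtop : ¬((S.map tripleOf).drop cnt = [] ∧ pending = []) := by
        rintro ⟨hr, hp⟩
        have h1' : N ≤ cnt := by
          have := congrArg List.length hr; simp [← hN] at this; omega
        have h2' : pq = [] := by
          have := hperm.length_eq; rw [hp] at this
          exact List.length_eq_zero_iff.1 this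
        exact hdone ⟨h2', by omega⟩
      cases hpq' : (((S.map tripleOf).drop cnt).take
          (countK ((S.map tripleOf).drop cnt) time)).foldl heapPush pq with
      | nil =>
        -- jump branch: nothing arrived and the queue is empty
        obtain ⟨hpqnil, htake⟩ := foldl_heapPush_eq_nil hpq'
        subst hpqnil
        have hpend : pending = [] := by
          have := hperm.length_eq
          exact List.length_eq_zero_iff.1 (by simpa using this.symm)
        subst hpend
        have hrne : (S.map tripleOf).drop cnt ≠ [] := by
          intro hr; exact hBtop ⟨hr, rfl⟩
        have hk0 : countK ((S.map tripleOf).drop cnt) time = 0 := by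
          rcases List.take_eq_nil_iff.1 htake with h | h
          · exact h
          · exact absurd h hrne
        have hcntN : cnt < N := by
          rcases not_and_or.1 hdone with h | h
          · exact absurd rfl h
          · omega
        have hcS : cnt < S.length := by omega
        have hlt : cnt < (S.map tripleOf).length := by simp [← hN]; omega
        have hget : PySem.List.pyGetD S (cnt : Int) [] = S[cnt] := by
          rw [PySem.List.pyGetD_natCast]; exact List.getD_eq_getElem _ _ hcS
        have hrest : (S.map tripleOf).drop cnt = tripleOf S[cnt] :: (S.map tripleOf).drop (cnt + 1) := by
          rw [List.drop_eq_getElem_cons hlt]; simp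
        -- the new time is the next arrival, identical on both sides
        have htime : (PySem.List.pyGetD (((S.map tripleOf).drop cnt).drop
              (countK ((S.map tripleOf).drop cnt) time)) 0 (0, 0, 0)).2.1 =
            PySem.List.pyGetD (PySem.List.pyGetD S ((cnt : Nat) : Int) []) 1 0 := by
          rw [hk0, List.drop_zero, hrest, hget, PySem.List.pyGetD_zero_cons]
          simp [tripleOf]
        -- arrival is strictly in the future (countK = 0 on a nonempty rest)
        have harr : time < PySem.List.pyGetD (PySem.List.pyGetD S ((cnt : Nat) : Int) []) 1 0 := by
          rw [hrest] at hk0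
          simp only [countK] at hk0
          rw [hget]
          split at hk0
          · omega
          · rename_i hgt
            exact lt_of_not_ge (by exact fun hc => hgt (by simpa [tripleOf] using hc))
        -- reduce A one step
        have hA : loopA S N (f1 + 1) cnt [] time ans =
            loopA S N f1 cnt [] (PySem.List.pyGetD (PySem.List.pyGetD S ((cnt : Nat) : Int) []) 1 0) ans := by
          simp only [loopA]
          rw [hpush, hk0]
          simp only [List.take_zero, List.foldl_nil, Nat.add_zero]
          rw [if_neg (by omega)]
        -- reduce B one step
        have hB : loopB (f2 + 1) ((S.map tripleOf).drop cnt) [] time ans =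
            loopB f2 ((S.map tripleOf).drop cnt)
              [] (PySem.List.pyGetD (PySem.List.pyGetD S ((cnt : Nat) : Int) []) 1 0) ans := by
          simp only [loopB]
          rw [if_neg (by simp [hrne]), htake]
          simp only [List.nil_append]
          rw [htime, hk0, List.drop_zero]
        rw [hA, hB]
        -- measure bookkeeping: the old indicator was 1, the new one is 0
        have hmuold : muA S N cnt [] time = 2 * (N - cnt) + 1 := by
          unfold muA
          rw [if_pos ⟨rfl, hcntN, harr⟩]
          simp
        have hmunew : muA S N cnt [] (PySem.List.pyGetD (PySem.List.pyGetD S ((cnt : Nat) : Int) []) 1 0)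
            = 2 * (N - cnt) := by
          unfold muA
          rw [if_neg (by rintro ⟨_, _, hlt'⟩; omega)]
          simp
        exact ih f2 cnt [] [] _ ans hcnt (by simp) (List.Perm.refl _) (by omega) (by omega)
      | cons m t =>
        obtain ⟨a, b, c⟩ := m
        set k := countK ((S.map tripleOf).drop cnt) time with hkdef
        have hklen : k ≤ N - cnt := by
          rw [hkdef, ← hrlen]; exact countK_le_length _ _
        have hsort' : ((a, b, c) :: t).Pairwise (fun x y => tupLt y x = false) := by
          rw [← hpq']
          exact foldl_heapPush_sorted _ pq hsort
        have hperm1' : ((a, b, c) :: t).Perm (pending ++ ((S.map tripleOf).drop cnt).take k) := by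
          rw [← hpq']
          exact (foldl_heapPush_perm _ pq).trans (hperm.append_right _)
        cases hp1 : pending ++ ((S.map tripleOf).drop cnt).take k with
        | nil =>
          exfalso
          rw [hp1] at hperm1'
          simpa using hperm1'.length_eq
        | cons b0 ps =>
        rw [hp1] at hperm1'
        have hmins := minScan_spec b0 ps
        have hhead : ∀ y ∈ (a, b, c) :: t, tupLt y (a, b, c) = false := by
          intro y hy
          rcases List.mem_cons.1 hy with rfl | hy'
          · exact tupLt_irrefl _
          · exact (List.pairwise_cons.1 hsort').1 y hy'
        have hmin : minScan b0 ps = (a, b, c) :=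
          tupLt_antisymm (hhead _ (hperm1'.mem_iff.2 hmins.1))
            (hmins.2 _ (hperm1'.subset List.mem_cons_self))
        have herase : t.Perm ((b0 :: ps).erase (a, b, c)) := by
          have h := hperm1'.erase (a, b, c)
          rwa [List.erase_cons_head] at h
        have hlen' : t.length + 1 = pq.length + k := by
          have hl := congrArg List.length hpq'
          rw [foldl_heapPush_length] at hl
          simp [List.length_take, hrlen] at hl
          omega
        have hdrop : ((S.map tripleOf).drop cnt).drop k = (S.map tripleOf).drop (cnt + k) := by
          rw [List.drop_drop, Nat.add_comm]
        have hA : loopA S N (f1 + 1) cnt pq time ans =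
            (if t = [] ∧ cnt + k = N then
              PySem.List.pySetD (PySem.List.pySetD ans a (PySem.List.pyGetD ans a 0 + (time - b))) 0 (time + c)
            else
              loopA S N f1 (cnt + k) t (time + c)
                (PySem.List.pySetD (PySem.List.pySetD ans a (PySem.List.pyGetD ans a 0 + (time - b))) 0 (time + c))) := by
          simp only [loopA]
          rw [hpush, hpq']
        have hB : loopB (f2 + 1) ((S.map tripleOf).drop cnt) pending time ans =
            loopB f2 (((S.map tripleOf).drop cnt).drop k) ((b0 :: ps).erase (a, b, c)) (time + c)
              (PySem.List.pySetD (PySem.List.pySetD ans a (PySem.List.pyGetD ans a 0 + (time - b))) 0 (time + c)) := by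
          simp only [loopB]
          rw [if_neg hBtop, hp1]
          simp only [hmin]
          rw [← hkdef]
        rw [hA, hB]
        have hmuold : 2 * ((N - cnt) + pq.length) ≤ muA S N cnt pq time := by
          unfold muA; split <;> omega
        by_cases hb : t = [] ∧ cnt + k = N
        · rw [if_pos hb]
          have hp2 : (b0 :: ps).erase (a, b, c) = [] := by
            have := herase.length_eq
            rw [hb.1] at this
            exact List.length_eq_zero_iff.1 this.symm
          have hdN : (S.map tripleOf).drop (cnt + k) = [] := by
            apply List.drop_eq_nil_of_le; simp [← hN]; omega
          rw [hp2, hdrop, hdN, loopB_done]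
        · rw [if_neg hb]
          rw [hdrop]
          have hmunew : muA S N (cnt + k) t (time + c) ≤ 2 * ((N - (cnt + k)) + t.length) + 1 := by
            unfold muA; split <;> omega
          exact ih f2 (cnt + k) t _ (time + c) _ (by omega) (List.pairwise_cons.1 hsort').2 herase
            (by omega) (by omega)


-- ===== VERDICT (by name: the statement is the Claim_ definition above) =====
theorem solution_spec : Claim_equal_solution := by
  intro program _ _
  unfold Spec_solution solution solution_alt
  have hlen : (PySem.List.sorted program (fun x => PySem.List.pyGetD x 1 0) false).length = program.length := by
    simpa using (PySem.List.sorted_perm program (fun x => PySem.List.pyGetD x 1 0) false).length_eq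
  have := loop_eq (PySem.List.sorted program (fun x => PySem.List.pyGetD x 1 0) false)
      program.length hlen.symm (2 * program.length + 1) (2 * program.length + 2)
      0 [] [] 0 (List.replicate 11 0) (by omega) (by simp) (List.Perm.refl _) ?_ ?_
  · simpa using this
  · simp [muA]; split <;> omega
  · simp [muA]; split <;> omega
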